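-- pv_equiv track=rewrite | github.com/joseangeldelangel10/CIECS | data_songs.py | split_midspace
-- ===== SOURCE A (Python) =====
-- def split_midspace(string):
--     res = ""
--     if " " in string:
--         mid_s = string.count(" ")//2
--         list_s = string.split()
--         for i in range(len(list_s)):
--             if i == mid_s:
--                 res += "\n"
--             res += list_s[i] + " "
--     else:
--         res = string
--
--     return res
-- ===== SOURCE B (Python) =====
-- def split_midspace(string):
--     if " " not in string:
--         return string
--     mid = string.count(" ") // 2
--     out = []
--     widx = 0
--     in_word = False
--     for ch in string:
--         if ch.isspace():
--             if in_word:
--                 out.append(" ")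
--                 in_word = False
--         else:
--             if not in_word:
--                 if widx == mid:
--                     out.append("\n")
--                 widx += 1
--                 in_word = True
--             out.append(ch)
--     if in_word:
--         out.append(" ")
--     return "".join(out)
-- ===== Notes on version B (the rewrite author's own statement) =====
-- stated objective: alternative
-- what changed: Replaces A's split()-into-a-word-list plus indexed reassembly loop with a single character-level state machine over the original string that emits words, separators and the midpoint newline directly (only the space count is taken up front).
import Mathlib
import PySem

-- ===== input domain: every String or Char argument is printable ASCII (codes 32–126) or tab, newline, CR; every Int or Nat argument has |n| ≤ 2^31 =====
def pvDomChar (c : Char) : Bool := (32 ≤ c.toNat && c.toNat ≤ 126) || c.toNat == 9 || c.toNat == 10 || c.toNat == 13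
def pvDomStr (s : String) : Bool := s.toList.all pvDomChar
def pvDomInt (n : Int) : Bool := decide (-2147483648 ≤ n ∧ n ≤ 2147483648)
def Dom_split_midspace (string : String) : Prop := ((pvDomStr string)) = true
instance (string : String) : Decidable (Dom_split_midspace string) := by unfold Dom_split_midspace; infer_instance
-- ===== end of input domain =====

-- B replaces A's split()-then-indexed-reassembly with a single character-level
-- state machine over the original string (objective: alternative decomposition).

-- ===== PORT A =====
def split_midspace (string : String) : String :=
  let res : String := ""
  if PySem.Str.isIn " " string then
    let mid_s : Int := PySem.Int.floordiv (PySem.Str.count string " " : Int) 2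
    let list_s : List String := PySem.Str.split₀ string
    (PySem.List.pyRange 0 (list_s.length : Int) 1).foldl
      (fun res i =>
        let res := if i = mid_s then res ++ "\n" else res
        res ++ PySem.List.pyGetD list_s i "" ++ " ") res
  else
    string

-- ===== PORT B =====
-- the for-loop of Source B: state (out, widx, in_word); out is the joined list of
-- appended fragments (Source B appends single-char/1-char strings; ported as chars — exact)
def altGo (mid : Nat) : List Char → List Char → Nat → Bool → List Char
  | [], out, _, inw => if inw then out ++ [' '] else out
  | c :: rest, out, widx, inw =>
    if PySem.Chars.isspace c then
      if inw then altGo mid rest (out ++ [' ']) widx false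
      else altGo mid rest out widx inw
    else
      if inw then altGo mid rest (out ++ [c]) widx true
      else altGo mid rest ((if widx = mid then out ++ ['\n'] else out) ++ [c]) (widx + 1) true

def split_midspace_alt (string : String) : String :=
  if !(PySem.Str.isIn " " string) then string
  else
    let mid : Nat := PySem.Str.count string " " / 2
    String.ofList (altGo mid string.toList [] 0 false)

-- ===== PRECONDITION & SPEC =====
def Spec_split_midspace (string : String) (out : String) : Prop := out = split_midspace_alt string
instance (string : String) (out : String) : Decidable (Spec_split_midspace string out) := by unfold Spec_split_midspace; infer_instance

-- ===== CLAIM (what is proved, stated in full; the proofs are below) =====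
def Claim_equal_split_midspace : Prop := ∀ (string : String), Dom_split_midspace string → Spec_split_midspace string (split_midspace string)

-- ===== LEMMAS AND PROOFS =====

theorem join_empty_cons (w : String) (rest : List String) :
    PySem.Str.join "" (w :: rest) = w ++ PySem.Str.join "" rest := by
  apply String.toList_inj.mp
  cases rest with
  | nil => simp [PySem.Str.join, PySem.Chars.join_singleton, PySem.Chars.join_nil]
  | cons b l => simp [PySem.Str.join, PySem.Chars.join_cons_cons]

theorem join_empty_flatten (l : List (List Char)) :
    PySem.Chars.join [] l = l.flatten := by
  induction l with
  | nil => simp [PySem.Chars.join_nil]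
  | cons a t ih =>
    cases t with
    | nil => simp [PySem.Chars.join_singleton]
    | cons b r => simp [PySem.Chars.join_cons_cons, ih]

theorem foldl_words_join (ws : List String) (acc : String) :
    ws.foldl (fun res w => res ++ w ++ " ") acc
      = acc ++ PySem.Str.join "" (ws.map (fun w => w ++ " ")) := by
  induction ws generalizing acc with
  | nil => simp [PySem.Str.join, PySem.Chars.join_nil]
  | cons w t ih =>
    rw [List.foldl_cons, ih, List.map_cons, join_empty_cons]
    simp [String.append_assoc]

theorem floordiv_two_nat (c : Nat) : PySem.Int.floordiv (c : Int) 2 = ((c / 2 : Nat) : Int) := by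
  rw [PySem.Int.floordiv, Int.fdiv_eq_ediv]
  simp

-- A's result, characterised when the string contains a space
theorem A_char (s : String) (h : PySem.Str.isIn " " s = true) :
    split_midspace s =
      (if PySem.Str.count s " " / 2 < (PySem.Str.split₀ s).length then
        PySem.Str.join "" (((PySem.Str.split₀ s).take (PySem.Str.count s " " / 2)).map (fun w => w ++ " "))
          ++ "\n"
          ++ PySem.Str.join "" (((PySem.Str.split₀ s).drop (PySem.Str.count s " " / 2)).map (fun w => w ++ " "))
      else
        PySem.Str.join "" ((PySem.Str.split₀ s).map (fun w => w ++ " "))) := by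
  unfold split_midspace
  rw [if_pos h]
  simp only [floordiv_two_nat]
  set mN : Nat := PySem.Str.count s " " / 2 with hm
  set words : List String := PySem.Str.split₀ s with hw
  by_cases hlt : mN < words.length
  · rw [if_pos hlt]
    have hc1 : ∀ x ∈ PySem.List.pyRange 0 (mN : Int), ∀ acc : String,
        (if x = (mN : Int) then acc ++ "\n" else acc) ++ PySem.List.pyGetD words x "" ++ " "
          = acc ++ PySem.List.pyGetD (words.take mN) x "" ++ " " := by
      intro j hj acc
      rw [PySem.List.mem_pyRange_one] at hj
      rw [if_neg (by omega : ¬ j = (mN : Int))]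
      congr 2
      have hj' : j = ((j.toNat : Nat) : Int) := by omega
      rw [hj', PySem.List.pyGetD_natCast, PySem.List.pyGetD_natCast]
      simp [List.getD_eq_getElem?_getD, (by omega : j.toNat < mN)]
    have hc2 : ∀ x ∈ PySem.List.pyRange ((mN : Int) + 1) (words.length : Int), ∀ acc : String,
        (if x = (mN : Int) then acc ++ "\n" else acc) ++ PySem.List.pyGetD words x "" ++ " "
          = acc ++ PySem.List.pyGetD words x "" ++ " " := by
      intro j hj acc
      rw [PySem.List.mem_pyRange_one] at hj
      rw [if_neg (by omega : ¬ j = (mN : Int))]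
    have hlen : ((words.take mN).length : Int) = (mN : Int) := by
      simp [List.length_take]; omega
    have H1 := PySem.List.foldl_pyRange_zero_pyGetD' (words.take mN) ""
      (fun res w => res ++ w ++ " ") ""
    rw [hlen] at H1
    have hget : PySem.List.pyGetD words (mN : Int) "" = words[mN] := by
      rw [PySem.List.pyGetD_natCast]
      exact List.getD_eq_getElem words "" hlt
    have hcons : words.drop mN = words[mN] :: words.drop (mN + 1) :=
      (List.getElem_cons_drop (as := words) (i := mN) hlt).symm
    rw [PySem.List.pyRange_one_append 0 (mN : Int) (words.length : Int)
          (by positivity) (by exact_mod_cast hlt.le),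
        PySem.List.pyRange_one_cons (a := (mN : Int)) (b := (words.length : Int))
          (by exact_mod_cast hlt),
        List.foldl_append, List.foldl_cons,
        PySem.List.foldl_congr_mem' _ _ _ _ hc1, H1, foldl_words_join,
        if_pos (rfl : (mN : Int) = (mN : Int)),
        PySem.List.foldl_congr_mem' _ _ _ _ hc2,
        PySem.List.foldl_pyRange_pyGetD' words "" (fun res w => res ++ w ++ " ") _
          (by positivity : (0 : Int) ≤ (mN : Int) + 1),
        (by norm_num : ((mN : Int) + 1).toNat = mN + 1),
        foldl_words_join, hget, hcons, List.map_cons, join_empty_cons]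
    simp [String.append_assoc]
  · rw [if_neg hlt]
    have hc3 : ∀ x ∈ PySem.List.pyRange 0 (words.length : Int), ∀ acc : String,
        (if x = (mN : Int) then acc ++ "\n" else acc) ++ PySem.List.pyGetD words x "" ++ " "
          = acc ++ PySem.List.pyGetD words x "" ++ " " := by
      intro j hj acc
      rw [PySem.List.mem_pyRange_one] at hj
      rw [if_neg (by omega : ¬ j = (mN : Int))]
    rw [PySem.List.foldl_congr_mem' _ _ _ _ hc3,
        PySem.List.foldl_pyRange_zero_pyGetD' words "" (fun res w => res ++ w ++ " ") "",
        foldl_words_join]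
    simp

-- the words A would see, rendered with a newline before word number mid
def render (mid : Nat) : Nat → List (List Char) → List Char
  | _, [] => []
  | widx, w :: t =>
    (if widx = mid then ['\n'] else []) ++ w ++ [' '] ++ render mid (widx + 1) t

-- rest of the current word / the words after it, for split₀'s mid-word state
def wrest : List Char → List Char
  | [] => []
  | c :: rest => if PySem.Chars.isspace c then [] else c :: wrest rest

def wtail : List Char → List (List Char)
  | [] => []
  | c :: rest => if PySem.Chars.isspace c then PySem.Chars.split₀ rest else wtail rest

theorem go_acc (cs : List Char) : ∀ cur acc,
    PySem.Chars.split₀.go cs cur acc = acc.reverse ++ PySem.Chars.split₀.go cs cur [] := by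
  induction cs with
  | nil =>
    intro cur acc
    simp only [PySem.Chars.split₀.go]
    by_cases h : cur.isEmpty <;> simp [h]
  | cons c rest ih =>
    intro cur acc
    simp only [PySem.Chars.split₀.go]
    by_cases hs : PySem.Chars.isspace c
    · by_cases h : cur.isEmpty
      · simp only [hs, h, if_true]
        rw [ih [] acc, ih [] []]
      · simp only [hs, h, if_true]
        rw [ih [] (cur.reverse :: acc), ih [] [cur.reverse]]
        simp
    · simp [hs]
      exact ih (c :: cur) acc

theorem go_char (cs : List Char) : ∀ cur acc, cur ≠ [] →
    PySem.Chars.split₀.go cs cur acc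
      = acc.reverse ++ (cur.reverse ++ wrest cs) :: wtail cs := by
  induction cs with
  | nil =>
    intro cur acc hc
    simp [PySem.Chars.split₀.go, List.isEmpty_iff, hc, wrest, wtail]
  | cons c rest ih =>
    intro cur acc hc
    simp only [PySem.Chars.split₀.go, List.isEmpty_iff, hc, if_false, wrest, wtail]
    by_cases hs : PySem.Chars.isspace c
    · simp only [hs, if_true]
      rw [go_acc]
      simp [PySem.Chars.split₀]
    · simp only [hs, if_false]
      rw [ih (c :: cur) acc (by simp)]
      simp

theorem altGo_spec (mid : Nat) (cs : List Char) : ∀ widx out,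
    (altGo mid cs out widx false = out ++ render mid widx (PySem.Chars.split₀ cs))
    ∧ (altGo mid cs out widx true = out ++ wrest cs ++ ' ' :: render mid widx (wtail cs)) := by
  induction cs with
  | nil =>
    intro widx out
    simp [altGo, PySem.Chars.split₀, PySem.Chars.split₀.go, render, wrest, wtail]
  | cons c rest ih =>
    intro widx out
    by_cases hs : PySem.Chars.isspace c
    · constructor
      · rw [show PySem.Chars.split₀ (c :: rest) = PySem.Chars.split₀ rest by
              simp [PySem.Chars.split₀, PySem.Chars.split₀.go, hs]]
        simp only [altGo, hs, if_true]
        exact (ih widx out).1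
      · simp only [altGo, hs, if_true, wrest, wtail]
        rw [(ih widx (out ++ [' '])).1]
        simp
    · constructor
      · simp only [altGo, hs]
        rw [(ih (widx + 1) ((if widx = mid then out ++ ['\n'] else out) ++ [c])).2]
        rw [show PySem.Chars.split₀ (c :: rest)
              = (c :: wrest rest) :: wtail rest by
              simp only [PySem.Chars.split₀, PySem.Chars.split₀.go, hs,
                List.isEmpty_nil, if_true]
              rw [go_char rest [c] [] (by simp)]
              simp]
        simp only [render]
        by_cases hw : widx = mid <;> simp [hw]
      · simp only [altGo, hs, wrest, wtail]
        rw [(ih widx (out ++ [c])).2]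
        simp

theorem render_high (mid : Nat) (ws : List (List Char)) : ∀ widx, mid < widx →
    render mid widx ws = (ws.map (fun w => w ++ [' '])).flatten := by
  induction ws with
  | nil => intro widx _; simp [render]
  | cons w t ih =>
    intro widx h
    rw [render, if_neg (by omega), ih (widx + 1) (by omega)]
    simp

theorem render_low (mid : Nat) (ws : List (List Char)) : ∀ widx, widx ≤ mid →
    render mid widx ws
      = ((ws.take (mid - widx)).map (fun w => w ++ [' '])).flatten
        ++ (if mid - widx < ws.length then
              '\n' :: ((ws.drop (mid - widx)).map (fun w => w ++ [' '])).flatten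
            else []) := by
  induction ws with
  | nil => intro widx _; simp [render]
  | cons w t ih =>
    intro widx h
    by_cases hw : widx = mid
    · rw [render, if_pos hw, render_high mid t (widx + 1) (by omega)]
      simp [hw]
    · rw [render, if_neg hw, ih (widx + 1) (by omega),
          show mid - widx = (mid - (widx + 1)) + 1 by omega]
      simp only [List.take_succ_cons, List.drop_succ_cons, List.map_cons, List.flatten_cons,
        List.length_cons]
      by_cases hlt : mid - (widx + 1) < t.length
      · rw [if_pos hlt, if_pos (by omega)]
        simp
      · rw [if_neg hlt, if_neg (by omega)]
        simp

-- B's result, characterised identically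
theorem B_char (s : String) (h : PySem.Str.isIn " " s = true) :
    split_midspace_alt s =
      (if PySem.Str.count s " " / 2 < (PySem.Str.split₀ s).length then
        PySem.Str.join "" (((PySem.Str.split₀ s).take (PySem.Str.count s " " / 2)).map (fun w => w ++ " "))
          ++ "\n"
          ++ PySem.Str.join "" (((PySem.Str.split₀ s).drop (PySem.Str.count s " " / 2)).map (fun w => w ++ " "))
      else
        PySem.Str.join "" ((PySem.Str.split₀ s).map (fun w => w ++ " "))) := by
  unfold split_midspace_alt
  rw [h]
  simp only [Bool.not_true, Bool.false_eq_true, if_false]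
  apply String.toList_inj.mp
  set mN : Nat := PySem.Str.count s " " / 2 with hm
  set words : List String := PySem.Str.split₀ s with hw
  have hlen : (PySem.Chars.split₀ s.toList).length = words.length := by
    rw [← PySem.Str.split₀_map_toList, List.length_map]
  have hws : PySem.Chars.split₀ s.toList = words.map String.toList :=
    (PySem.Str.split₀_map_toList s).symm
  rw [String.toList_ofList, (altGo_spec mN s.toList 0 []).1, List.nil_append,
      render_low mN (PySem.Chars.split₀ s.toList) 0 (Nat.zero_le mN), Nat.sub_zero, hws]
  by_cases hlt : mN < words.length
  · rw [if_pos (by simpa using hlt), if_pos hlt]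
    simp [join_empty_flatten, Function.comp_def,
      show (" " : String).toList = [' '] from rfl,
      show ("\n" : String).toList = ['\n'] from rfl]
  · rw [if_neg (by simpa using hlt), if_neg hlt,
        List.take_of_length_le (by simp only [List.length_map]; omega)]
    simp [join_empty_flatten, Function.comp_def,
      show (" " : String).toList = [' '] from rfl]

-- ===== VERDICT (by name: the statement is the Claim_ definition above) =====
theorem split_midspace_spec : Claim_equal_split_midspace := by
  intro s _
  unfold Spec_split_midspace
  cases h : PySem.Str.isIn " " s with
  | false =>
    unfold split_midspace split_midspace_alt
    rw [h]
    simp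
  | true => rw [A_char s h, B_char s h]
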